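-- pv_equiv track=rewrite | github.com/hdz-088/StatPy | statistics.py | findingCF
-- ===== SOURCE A (Python) =====
-- def cfTerm(fi):
--     n = 0
--     maxFreq = 0
--     term = 0
--     while n < len(fi):
--         if maxFreq < fi[n]:
--             maxFreq = fi[n]
--             term = n
--         n = n + 1
--     return term
--
-- def findingCF(fi):
--     """
--     Function to Find Cumulative Frequency(CF) For Mode
--     """
--     term = cfTerm(fi)
--     cfreq = 0
--     n = 0
--     while n < term:
--         cfreq = cfreq + fi[n]
--         n = n+1
--     return cfreq
-- ===== SOURCE B (Python) =====
-- def findingCF(fi):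
--     """
--     Function to Find Cumulative Frequency(CF) For Mode
--     """
--     cfreq = 0
--     maxFreq = 0
--     result = 0
--     for x in fi:
--         if maxFreq < x:
--             maxFreq = x
--             result = cfreq
--         cfreq = cfreq + x
--     return result
-- ===== Notes on version B (the rewrite author's own statement) =====
-- stated objective: simpler
-- what changed: Replaced A's two index-driven while loops (find the first strict-max index, then re-scan to sum the prefix) by a single structural pass that keeps a running sum and snapshots it whenever a new strict maximum appears.
import Mathlib
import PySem

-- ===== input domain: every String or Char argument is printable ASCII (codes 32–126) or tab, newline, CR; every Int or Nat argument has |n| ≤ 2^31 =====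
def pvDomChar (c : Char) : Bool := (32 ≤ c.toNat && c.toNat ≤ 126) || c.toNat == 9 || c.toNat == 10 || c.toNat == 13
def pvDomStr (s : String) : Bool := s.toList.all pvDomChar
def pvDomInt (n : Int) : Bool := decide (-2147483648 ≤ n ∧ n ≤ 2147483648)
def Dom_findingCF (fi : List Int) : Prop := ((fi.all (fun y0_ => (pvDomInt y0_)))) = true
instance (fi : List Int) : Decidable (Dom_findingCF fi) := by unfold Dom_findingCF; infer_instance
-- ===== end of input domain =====

-- B fuses A's two index-driven passes into one structural pass with a running sum; objective: simpler.

-- ===== PORT A =====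
-- while loop of cfTerm: n counts up to len fi, state (maxFreq, term); fuel only makes the
-- loop structurally total (it never runs out: fuel starts at len fi and n starts at 0)
def cfTermGo (fi : List Int) : Nat → Nat → Int → Int → Int
  | 0, _, _, term => term
  | fuel + 1, n, maxFreq, term =>
    if h : n < fi.length then
      if maxFreq < fi[n] then cfTermGo fi fuel (n + 1) fi[n] (n : Int)
      else cfTermGo fi fuel (n + 1) maxFreq term
    else term

def cfTerm (fi : List Int) : Int := cfTermGo fi fi.length 0 0 0

-- while loop of findingCF: n counts up to term, summing fi[n]; same fuel device.
-- fi.getD n 0 is exact here: Python's fi[n] never raises since term ≤ len(fi), so n is always in range.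
def cfSumGo (fi : List Int) : Nat → Nat → Int → Int → Int
  | 0, _, _, cfreq => cfreq
  | fuel + 1, n, term, cfreq =>
    if (n : Int) < term then cfSumGo fi fuel (n + 1) term (cfreq + fi.getD n 0)
    else cfreq

def findingCF (fi : List Int) : Int := cfSumGo fi fi.length 0 (cfTerm fi) 0

-- ===== PORT B =====
def bStep (s : Int × Int × Int) (x : Int) : Int × Int × Int :=
  if s.2.1 < x then (s.1 + x, x, s.1) else (s.1 + x, s.2.1, s.2.2)

def findingCF_alt (fi : List Int) : Int := (fi.foldl bStep (0, 0, 0)).2.2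

-- ===== PRECONDITION & SPEC =====
def Spec_findingCF (fi : List Int) (out : Int) : Prop := out = findingCF_alt fi
instance (fi : List Int) (out : Int) : Decidable (Spec_findingCF fi out) := by unfold Spec_findingCF; infer_instance

-- ===== CLAIM (what is proved, stated in full; the proofs are below) =====
def Claim_equal_findingCF : Prop := ∀ (fi : List Int), Dom_findingCF fi → Spec_findingCF fi (findingCF fi)

-- ===== LEMMAS AND PROOFS =====

-- structural version of A's first loop, scanning l = fi.drop n with absolute index n
def cfTermL : List Int → Int → Int → Int → Int
  | [], _, _, t => t
  | x :: xs, n, m, t => if m < x then cfTermL xs (n + 1) x n else cfTermL xs (n + 1) m t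

theorem sum_take_succ (fi : List Int) (n : Nat) (h : n < fi.length) :
    (fi.take n).sum + fi[n] = (fi.take (n + 1)).sum := by
  rw [List.take_add_one, List.getElem?_eq_getElem h]
  simp only [Option.toList_some, List.sum_append, List.sum_cons, List.sum_nil]
  ring

theorem drop_cons (fi : List Int) (n : Nat) (x : Int) (xs : List Int)
    (hl : x :: xs = fi.drop n) :
    ∃ h : n < fi.length, x = fi[n] ∧ xs = fi.drop (n + 1) := by
  have hn : n < fi.length := by
    by_contra h
    rw [List.drop_eq_nil_of_le (Nat.le_of_not_lt h)] at hl
    exact List.cons_ne_nil _ _ hl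
  rw [List.drop_eq_getElem_cons hn] at hl
  exact ⟨hn, (List.cons.injEq _ _ _ _ ▸ hl).1, (List.cons.injEq _ _ _ _ ▸ hl).2⟩

theorem cfTermGo_eq (fi : List Int) (fuel n : Nat) (m t : Int)
    (hfuel : fi.length ≤ fuel + n) :
    cfTermGo fi fuel n m t = cfTermL (fi.drop n) (n : Int) m t := by
  induction fuel generalizing n m t with
  | zero =>
    have : fi.drop n = [] := List.drop_eq_nil_of_le (by omega)
    simp [cfTermGo, this, cfTermL]
  | succ fuel ih =>
    by_cases h : n < fi.length
    · rw [List.drop_eq_getElem_cons h]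
      simp only [cfTermGo, h, dif_pos, cfTermL]
      have hcast : ((n : Int) + 1) = ((n + 1 : Nat) : Int) := by push_cast; ring
      split_ifs with hm
      · rw [ih (n + 1) fi[n] (n : Int) (by omega), hcast]
      · rw [ih (n + 1) m t (by omega), hcast]
    · have hnil : fi.drop n = [] := List.drop_eq_nil_of_le (Nat.le_of_not_lt h)
      simp [cfTermGo, h, hnil, cfTermL]

theorem cfTermL_bounds (l : List Int) (n : Nat) (m t : Int)
    (ht0 : 0 ≤ t) (htn : t.toNat ≤ n) :
    0 ≤ cfTermL l (n : Int) m t ∧ (cfTermL l (n : Int) m t).toNat ≤ n + l.length := by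
  induction l generalizing n m t with
  | nil => simp [cfTermL]; omega
  | cons x xs ih =>
    simp only [cfTermL]
    have hcast : ((n : Int) + 1) = ((n + 1 : Nat) : Int) := by push_cast; ring
    split_ifs
    · have := ih (n + 1) x (n : Int) (by positivity) (by simp)
      rw [hcast]
      simp only [List.length_cons] at this ⊢
      omega
    · have := ih (n + 1) m t ht0 (by omega)
      rw [hcast]
      simp only [List.length_cons] at this ⊢
      omega

theorem cfSumGo_eq (fi : List Int) (fuel n : Nat) (term c : Int)
    (hterm : term.toNat ≤ fi.length) (hfuel : term.toNat ≤ fuel + n) :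
    cfSumGo fi fuel n term c = c + ((fi.drop n).take (term.toNat - n)).sum := by
  induction fuel generalizing n c with
  | zero =>
    have h0 : term.toNat - n = 0 := by omega
    simp [cfSumGo, h0]
  | succ fuel ih =>
    by_cases h : (n : Int) < term
    · have hn : n < fi.length := by omega
      simp only [cfSumGo, h, if_pos]
      rw [ih (n + 1) (c + fi.getD n 0) (by omega)]
      rw [List.drop_eq_getElem_cons hn]
      have hk : term.toNat - n = (term.toNat - (n + 1)) + 1 := by omega
      rw [hk, List.take_succ_cons, List.sum_cons, List.getD_eq_getElem fi 0 hn]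
      ring
    · have h0 : term.toNat - n = 0 := by omega
      simp [cfSumGo, h, h0]

-- key invariant for B's fold: third component tracks the prefix sum before the current max index
theorem fold_inv (fi : List Int) (l : List Int) (n : Nat) (m t : Int)
    (hl : l = fi.drop n) (ht0 : 0 ≤ t) (htn : t.toNat ≤ n) :
    (l.foldl bStep ((fi.take n).sum, m, (fi.take t.toNat).sum)).2.2
      = (fi.take (cfTermL l (n : Int) m t).toNat).sum := by
  induction l generalizing n m t with
  | nil => simp [cfTermL]
  | cons x xs ih =>
    obtain ⟨hn, hx, hxs⟩ := drop_cons fi n x xs hl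
    subst hx
    simp only [List.foldl_cons, cfTermL, bStep]
    have hcast : ((n : Int) + 1) = ((n + 1 : Nat) : Int) := by push_cast; ring
    split_ifs with hm
    · have := ih (n + 1) fi[n] (n : Int) hxs (by positivity) (by simp)
      simp only [Int.toNat_natCast] at this
      rw [sum_take_succ fi n hn, hcast, this]
    · have := ih (n + 1) m t hxs ht0 (by omega)
      rw [sum_take_succ fi n hn, hcast, this]

-- ===== VERDICT (by name: the statement is the Claim_ definition above) =====
theorem findingCF_spec : Claim_equal_findingCF := by
  intro fi _
  unfold Spec_findingCF findingCF findingCF_alt cfTerm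
  have hb := cfTermL_bounds (fi.drop 0) 0 0 0 le_rfl le_rfl
  rw [cfTermGo_eq fi fi.length 0 0 0 (by omega)]
  have hlen : (cfTermL (fi.drop 0) ((0:Nat):Int) 0 0).toNat ≤ fi.length := by
    simpa using hb.2
  rw [cfSumGo_eq fi fi.length 0 _ 0 hlen (by omega)]
  have hf := fold_inv fi fi 0 0 0 (by simp) le_rfl le_rfl
  simp only [List.drop_zero, List.take_zero, List.sum_nil, Nat.cast_zero, Int.toNat_zero,
    Nat.sub_zero, zero_add] at hf ⊢
  exact hf.symm
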